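-- pv_equiv track=rewrite | github.com/SelmiNazeeb/devOps | 007_Python/ass1.py | nsmall
-- ===== SOURCE A (Python) =====
-- def nsmall(arr,n):
--     for _ in range(n):
--         small = None
--         for i in arr:
--             if small == None or i<small:
--                 small = i
--         new_arr=[]
--         for x in arr:
--             if x!=small:
--                 new_arr.append(x)
--         arr = new_arr
--     return small
-- ===== SOURCE B (Python) =====
-- def nsmall(arr, n):
--     vals = sorted(set(arr))
--     return vals[n - 1] if 0 < n <= len(vals) else None
-- ===== Notes on version B (the rewrite author's own statement) =====
-- stated objective: faster
-- what changed: Replaces n repeated min-scan-and-filter passes over the list with one sort of the distinct values followed by a direct index.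
-- crash fix: For n <= 0 A raises UnboundLocalError (the loop body never runs, so 'small' is unbound); B returns None there. — e.g. on nsmall([1], 0): A raises UnboundLocalError, B returns none
import Mathlib
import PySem

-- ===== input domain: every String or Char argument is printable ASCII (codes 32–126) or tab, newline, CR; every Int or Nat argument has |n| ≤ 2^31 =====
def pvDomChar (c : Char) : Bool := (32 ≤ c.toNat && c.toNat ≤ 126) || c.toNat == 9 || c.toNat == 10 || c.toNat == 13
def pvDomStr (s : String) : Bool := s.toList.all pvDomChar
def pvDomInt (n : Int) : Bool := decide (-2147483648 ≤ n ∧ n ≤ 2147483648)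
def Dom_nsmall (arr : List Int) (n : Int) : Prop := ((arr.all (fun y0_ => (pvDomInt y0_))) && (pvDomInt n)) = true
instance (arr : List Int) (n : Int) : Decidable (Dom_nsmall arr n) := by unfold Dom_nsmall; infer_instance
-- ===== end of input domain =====

-- B replaces A's n min-scan-and-filter passes by sorting the distinct values once and indexing (faster; equivalence is for n ≥ 1, where A returns).

-- ===== PORT A =====
-- one iteration of A's outer loop: find the minimum, then keep the non-minimal elements
def nsmallPass (arr : List Int) : List Int × Option Int :=
  let small := arr.foldl
    (fun small i => match small with
      | none => some i
      | some s => if i < s then some i else some s) none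
  let newArr := arr.foldl (fun acc x => if some x ≠ small then acc ++ [x] else acc) []
  (newArr, small)

def nsmall (arr : List Int) (n : Int) : Option Int :=
  ((PySem.List.pyRange 0 n 1).foldl
    (fun (st : List Int × Option Int) _ => nsmallPass st.1) (arr, none)).2

-- ===== PORT B =====
def nsmall_alt (arr : List Int) (n : Int) : Option Int :=
  let vals := PySem.List.sorted (PySem.Set.ofList arr) (fun x => x) false
  if 0 < n ∧ n ≤ (vals.length : Int) then PySem.List.pyGet? vals (n - 1) else none

-- ===== PRECONDITION & SPEC =====
-- Pre_ excludes exactly n ≤ 0, where A's loop body never runs and 'small' is unbound (UnboundLocalError).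
def Pre_nsmall (arr : List Int) (n : Int) : Prop := 1 ≤ n
instance (arr : List Int) (n : Int) : Decidable (Pre_nsmall arr n) := by unfold Pre_nsmall; infer_instance
def pvWitness_nsmall : List Int × Int := ([3, 1, 3, 2], 2)

-- For n ≤ 0 A raises UnboundLocalError (the loop body never runs, so 'small' is unbound); B returns None there (theorem nsmall_raises below).
def Raises_nsmall (arr : List Int) (n : Int) : Prop := n ≤ 0
instance (arr : List Int) (n : Int) : Decidable (Raises_nsmall arr n) := by unfold Raises_nsmall; infer_instance
def pvRaiseWitness_nsmall : List Int × Int := ([1], 0)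
def pvRaiseWitnessOut_nsmall : Option Int := none

def Spec_nsmall (arr : List Int) (n : Int) (out : Option Int) : Prop := out = nsmall_alt arr n
instance (arr : List Int) (n : Int) (out : Option Int) : Decidable (Spec_nsmall arr n out) := by unfold Spec_nsmall; infer_instance

-- ===== CLAIM (what is proved, stated in full; the proofs are below) =====
def Claim_equal_nsmall : Prop := ∀ (arr : List Int) (n : Int), Dom_nsmall arr n → Pre_nsmall arr n → Spec_nsmall arr n (nsmall arr n)
def Claim_raises_nsmall : Prop := (∀ (arr : List Int) (n : Int), Dom_nsmall arr n → Raises_nsmall arr n → ¬ Pre_nsmall arr n) ∧ (Dom_nsmall (pvRaiseWitness_nsmall.1) (pvRaiseWitness_nsmall.2) ∧ Raises_nsmall (pvRaiseWitness_nsmall.1) (pvRaiseWitness_nsmall.2) ∧ nsmall_alt (pvRaiseWitness_nsmall.1) (pvRaiseWitness_nsmall.2) = pvRaiseWitnessOut_nsmall)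

-- ===== LEMMAS AND PROOFS =====

-- the sorted distinct values of arr, B's central object
def sd (arr : List Int) : List Int :=
  PySem.List.sorted (PySem.Set.ofList arr) (fun x => x) false

lemma minFoldGo (a : List Int) (s : Int) :
    a.foldl (fun small i => match small with
      | none => some i
      | some t => if i < t then some i else some t) (some s)
    = some (a.foldl min s) := by
  induction a generalizing s with
  | nil => rfl
  | cons x xs ih =>
      simp only [List.foldl]
      by_cases h : x < s
      · rw [if_pos h, ih, min_eq_right h.le]
      · rw [if_neg h, ih, min_eq_left (by omega)]

lemma minFold_eq_min? (a : List Int) :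
    a.foldl (fun small i => match small with
      | none => some i
      | some t => if i < t then some i else some t) none
    = PySem.List.min? a (fun y => y) := by
  cases a with
  | nil =>
      show (PySem.List.min? ([] : List Int) (fun y => y)) = none
      rw [PySem.List.min?_eq_none_iff]
  | cons x xs =>
      rw [PySem.List.min?_id_cons]
      simpa using minFoldGo xs x

lemma sd_head (a : List Int) : (sd a).head? =
    PySem.List.min? a (fun y => y) := by
  cases h : sd a with
  | nil =>
      have : PySem.Set.ofList a = [] := by
        simpa [sd, PySem.List.sorted_eq_nil_iff] using h
      have ha : a = [] := by
        cases a with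
        | nil => rfl
        | cons y ys =>
            exfalso
            have hy : y ∈ PySem.Set.ofList (y :: ys) := by
              simp [PySem.Set.mem_ofList]
            rw [this] at hy
            simp at hy
      subst ha
      show (PySem.List.min? ([] : List Int) (fun y => y)) = none
      rw [PySem.List.min?_eq_none_iff]
  | cons m t =>
      have hmem : m ∈ a := by
        have : m ∈ sd a := by simp [h]
        simpa [sd, PySem.List.mem_sorted, PySem.Set.mem_ofList] using this
      have hle : ∀ y ∈ a, m ≤ y := by
        intro y hy
        have := PySem.List.key_head_sorted_le (xs := PySem.Set.ofList a)
          (key := fun x => x) (m := m) (t := t) h y (by simpa [PySem.Set.mem_ofList] using hy)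
        simpa using this
      have hne : a ≠ [] := by rintro rfl; simp at hmem
      obtain ⟨v, hv⟩ : ∃ v, PySem.List.min? a (fun y => y) = some v := by
        cases hm : PySem.List.min? a (fun y => y) with
        | none => exact absurd (by simpa [PySem.List.min?_eq_none_iff] using hm) hne
        | some v => exact ⟨v, rfl⟩
      have hvmem : v ∈ a := PySem.List.min?_mem hv
      have hvmin : ∀ y ∈ a, v ≤ y := by
        intro y hy
        simpa using PySem.List.min?_isMin hv y hy
      have : v = m := le_antisymm (hvmin m hmem) (hle v hvmem)
      simp [hv, this]

lemma filterFold (a : List Int) (s : Option Int) :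
    a.foldl (fun acc x => if some x ≠ s then acc ++ [x] else acc) []
    = a.filter (fun x => some x ≠ s) := by
  induction a using List.reverseRecOn with
  | nil => rfl
  | append_singleton xs x ih =>
      rw [List.foldl_append, List.filter_append, ih]
      by_cases h : some x = s <;> simp [h]

lemma sd_tail (a : List Int) (m : Int) (t : List Int) (h : sd a = m :: t) :
    sd (a.filter (fun x => some x ≠ some m)) = t := by
  have hpw : (sd a).Pairwise (· < ·) := PySem.List.sorted_ofList_pairwise_lt a
  rw [h] at hpw
  have htpw : t.Pairwise (· < ·) := hpw.of_cons
  have hmt : ∀ y ∈ t, m < y := by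
    intro y hy; exact (List.pairwise_cons.mp hpw).1 y hy
  have hmem_sd : ∀ x, x ∈ sd a ↔ x ∈ a := by
    intro x; simp [sd, PySem.List.mem_sorted, PySem.Set.mem_ofList]
  have hmem : ∀ x, x ∈ t ↔ x ∈ a ∧ x ≠ m := by
    intro x
    constructor
    · intro hx
      refine ⟨(hmem_sd x).mp (by simp [h, hx]), ?_⟩
      exact fun hxm => absurd (hmt x hx) (by simp [hxm])
    · rintro ⟨hxa, hxm⟩
      have : x ∈ sd a := (hmem_sd x).mpr hxa
      rw [h] at this
      rcases List.mem_cons.mp this with rfl | hxt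
      · exact absurd rfl hxm
      · exact hxt
  apply PySem.List.sorted_eq_of_perm_of_pairwise_lt
  · rw [List.perm_ext_iff_of_nodup htpw.nodup (PySem.Set.nodup_ofList _)]
    intro x
    simp [PySem.Set.mem_ofList, List.mem_filter, hmem]
  · simpa using htpw

-- one pass: the minimum is the head of sd, the remainder's sd is the tail of sd
lemma nsmallPass_spec (a : List Int) :
    (nsmallPass a).2 = (sd a).head? ∧ sd (nsmallPass a).1 = (sd a).tail := by
  constructor
  · simp only [nsmallPass]
    rw [minFold_eq_min?, sd_head]
  · simp only [nsmallPass]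
    rw [minFold_eq_min?, ← sd_head, filterFold]
    cases h : sd a with
    | nil =>
        have : PySem.Set.ofList a = [] := by
          simpa [sd, PySem.List.sorted_eq_nil_iff] using h
        have ha : a = [] := by
          cases a with
          | nil => rfl
          | cons y ys =>
              exfalso
              have hy : y ∈ PySem.Set.ofList (y :: ys) := by simp [PySem.Set.mem_ofList]
              rw [this] at hy
              simp at hy
        simp [ha, sd, PySem.List.sorted_eq_nil_iff]
    | cons m t =>
        simp only [List.head?_cons, List.tail_cons]
        exact sd_tail a m t h

-- the outer loop: after folding over a nonempty list l, small is sd arr indexed at l.length - 1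
lemma loopLemma (l : List Int) (a : List Int) (s : Option Int) (hl : l ≠ []) :
    (l.foldl (fun (st : List Int × Option Int) _ => nsmallPass st.1) (a, s)).2
    = (sd a)[l.length - 1]? := by
  induction l generalizing a s with
  | nil => exact absurd rfl hl
  | cons x xs ih =>
      simp only [List.foldl]
      cases hxs : xs with
      | nil =>
          simp only [List.foldl, List.length_cons, List.length_nil]
          rw [(nsmallPass_spec a).1]
          cases sd a <;> simp
      | cons y ys =>
          rw [← hxs]
          have hxs' : xs ≠ [] := by simp [hxs]
          have h1 : nsmallPass a = ((nsmallPass a).1, (nsmallPass a).2) := rfl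
          rw [h1, ih _ _ hxs', (nsmallPass_spec a).2]
          have hlen : 0 < xs.length := List.length_pos_of_ne_nil hxs'
          rw [List.getElem?_tail]
          congr 1
          simp only [List.length_cons]
          omega

-- ===== VERDICT (by name: the statement is the Claim_ definition above) =====
theorem nsmall_spec : Claim_equal_nsmall := by
  intro arr n _ hpre
  unfold Spec_nsmall nsmall nsmall_alt
  have h0 : (1 : Int) ≤ n := hpre
  have hl : PySem.List.pyRange 0 n 1 ≠ [] := by
    have : (0 : Int) ∈ PySem.List.pyRange 0 n 1 := by
      rw [PySem.List.mem_pyRange_one]; omega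
    exact List.ne_nil_of_mem this
  rw [loopLemma _ _ _ hl, PySem.List.length_pyRange_one]
  show (sd arr)[(n - 0).toNat - 1]? = _
  by_cases hle : n ≤ ((PySem.List.sorted (PySem.Set.ofList arr) (fun x => x) false).length : Int)
  · have h01 : 0 < n ∧ n ≤ ((PySem.List.sorted (PySem.Set.ofList arr) (fun x => x) false).length : Int) := ⟨by omega, hle⟩
    rw [if_pos h01]
    have : n - 1 = ((n.toNat - 1 : Nat) : Int) := by omega
    rw [this, PySem.List.pyGet?_natCast]
    show (sd arr)[(n - 0).toNat - 1]? = (sd arr)[n.toNat - 1]?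
    congr 1
    omega
  · rw [if_neg (by omega)]
    apply List.getElem?_eq_none
    show (sd arr).length ≤ (n - 0).toNat - 1
    unfold sd
    omega

@[simp] theorem nsmall_raises : Claim_raises_nsmall := by
  unfold Claim_raises_nsmall
  constructor
  · intro arr n _ hr hp
    exact absurd hp (by unfold Pre_nsmall Raises_nsmall at *; omega)
  · exact ⟨by decide, by decide, by decide⟩
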